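-- pv_equiv track=rewrite | github.com/E-Williamson121/Unique-Crosswordles | uniquetripleanalysis.py | bucket_puzzles_by_greens
-- ===== SOURCE A (Python) =====
-- def numtoternary(x):
--     nums = []
--     while x > 0:
--         x, r = divmod(x, 3)
--         nums.append(r)
--     while len(nums) < 5: nums.append(0)
--     return nums[::-1]
--
-- def sort_dict(mydict):
--     sorted_dict = {}
--     for key in sorted(mydict):
--         sorted_dict[key] = mydict[key]
--     return sorted_dict
--
-- def bucket_puzzles_by_greens(puzzles):
--     number_puzzles = {}
--     number_counts = {}
--     for puzzle in puzzles:
--         words, nums = puzzle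
--         s = sum(map(lambda x: sum(map(lambda x: x == 2, numtoternary(x))), nums))
--         if s in number_puzzles.keys():
--             number_puzzles[s].append(puzzle)
--             number_counts[s] += 1
--         else:
--             number_puzzles[s] = [puzzle]
--             number_counts[s] = 1
--     return number_puzzles, sort_dict(number_counts)
-- ===== SOURCE B (Python) =====
-- def bucket_puzzles_by_greens(puzzles):
--     def greens(x):
--         g = 0
--         i = 0
--         while 3 ** i <= x:
--             if x // 3 ** i % 3 == 2:
--                 g += 1
--             i += 1
--         return g
--     keys = [sum(greens(x) for x in nums) for _, nums in puzzles]
--     order = list(dict.fromkeys(keys))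
--     buckets = {k: [p for p, kk in zip(puzzles, keys) if kk == k] for k in order}
--     counts = {k: len(buckets[k]) for k in sorted(order)}
--     return buckets, counts
-- ===== Notes on version B (the rewrite author's own statement) =====
-- stated objective: alternative
-- what changed: B replaces A's single incremental pass maintaining two parallel dicts by staged passes: it first computes the key list (counting green digits by scanning powers of 3 with x//3**i%3 instead of repeatedly dividing x down and building a padded reversed digit list), deduplicates it with dict.fromkeys to get the key order, then builds each bucket by filtering the zipped puzzle/key list per distinct key, and derives counts as bucket lengths over sorted keys.
import Mathlib
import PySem

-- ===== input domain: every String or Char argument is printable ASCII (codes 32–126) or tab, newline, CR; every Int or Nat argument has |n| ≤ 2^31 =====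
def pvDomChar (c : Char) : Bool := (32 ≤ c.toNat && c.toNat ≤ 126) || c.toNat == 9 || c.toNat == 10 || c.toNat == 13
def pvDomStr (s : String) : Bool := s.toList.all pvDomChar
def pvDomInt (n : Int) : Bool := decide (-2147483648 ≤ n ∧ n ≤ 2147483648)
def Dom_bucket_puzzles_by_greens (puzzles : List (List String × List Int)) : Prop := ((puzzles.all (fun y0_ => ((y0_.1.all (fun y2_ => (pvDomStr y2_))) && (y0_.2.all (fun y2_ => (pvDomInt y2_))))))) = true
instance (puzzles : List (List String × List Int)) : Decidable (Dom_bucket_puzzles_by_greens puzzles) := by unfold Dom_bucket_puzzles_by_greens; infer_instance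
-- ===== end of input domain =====

-- B replaces A's incremental two-dict fold by staged passes: a powers-of-3 digit scan per number,
-- a dedup of the key list (dict.fromkeys), and buckets rebuilt per distinct key by filtering; alternative decomposition, same cost class.
-- Loops on integers are ported with an explicit fuel counter (a totality guard only; fuel is provably sufficient).


-- ===== PORT A =====
-- the 'while x > 0: x, r = divmod(x, 3); nums.append(r)' loop of numtoternary (fuel = totality guard, sufficient at x.toNat)
def pvNumsLoopF : Nat → Int → List Int
  | 0, _ => []
  | fuel+1, x =>
    if 0 < x then PySem.Int.mod x 3 :: pvNumsLoopF fuel (PySem.Int.floordiv x 3) else []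

def pvNumsLoop (x : Int) : List Int := pvNumsLoopF x.toNat x

-- the 'while len(nums) < 5: nums.append(0)' loop (fuel = totality guard, sufficient at 5 - length)
def pvPadF : Nat → List Int → List Int
  | 0, nums => nums
  | fuel+1, nums => if nums.length < 5 then pvPadF fuel (nums ++ [0]) else nums

def pvPad (nums : List Int) : List Int := pvPadF (5 - nums.length) nums

def numtoternary (x : Int) : List Int := (pvPad (pvNumsLoop x)).reverse

-- sort_dict: iterate sorted(mydict) (= sorted keys) rebuilding a dict.
-- 'mydict[key]' is ported as getD with default 0: exact, since key comes from mydict's own keys.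
def sort_dict (d : PySem.Dict Int Int) : PySem.Dict Int Int :=
  (PySem.List.sorted d.keys (fun k => k) false).foldl
    (fun sd k => sd.insert k (d.getD k 0)) PySem.Dict.empty

-- one iteration of A's main loop over puzzles (state: number_puzzles, number_counts)
def pvStepA (st : PySem.Dict Int (List (List String × List Int)) × PySem.Dict Int Int)
    (puzzle : List String × List Int) :
    PySem.Dict Int (List (List String × List Int)) × PySem.Dict Int Int :=
  let s := (puzzle.2.map (fun x =>
    ((numtoternary x).map (fun d => if d = 2 then (1 : Int) else 0)).sum)).sum
  if st.1.contains s then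
    (st.1.modify s [] (fun l => l ++ [puzzle]), st.2.modify s 0 (fun c => c + 1))
  else
    (st.1.insert s [puzzle], st.2.insert s 1)

def bucket_puzzles_by_greens (puzzles : List (List String × List Int)) :
    (List (Int × List (List String × List Int))) × (List (Int × Int)) :=
  let st := puzzles.foldl pvStepA (PySem.Dict.empty, PySem.Dict.empty)
  (st.1.items, (sort_dict st.2).items)

-- ===== PORT B =====
-- B's 'while 3**i <= x: if x // 3**i % 3 == 2: g += 1; i += 1' loop (fuel = totality guard, sufficient at x.toNat)
def pvPowLoopF : Nat → Int → Nat → Int → Int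
  | 0, _, _, g => g
  | fuel+1, x, i, g =>
    if (3:Int)^i ≤ x then
      pvPowLoopF fuel x (i+1)
        (if PySem.Int.mod (PySem.Int.floordiv x ((3:Int)^i)) 3 = 2 then g + 1 else g)
    else g

def pvGreens (x : Int) : Int := pvPowLoopF x.toNat x 0 0

def bucket_puzzles_by_greens_alt (puzzles : List (List String × List Int)) :
    (List (Int × List (List String × List Int))) × (List (Int × Int)) :=
  let keys := puzzles.map (fun p => (p.2.map (fun x => pvGreens x)).sum)
  let order := PySem.Set.ofList keys       -- list(dict.fromkeys(keys))
  let buckets := order.foldl (fun d k =>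
    d.insert k (((puzzles.zip keys).filter (fun pk => pk.2 == k)).map (fun pk => pk.1)))
    PySem.Dict.empty
  let counts := (PySem.List.sorted order (fun k => k) false).foldl
    (fun c k => c.insert k ((buckets.getD k []).length : Int)) PySem.Dict.empty
  (buckets.items, counts.items)

-- ===== PRECONDITION & SPEC =====
def Spec_bucket_puzzles_by_greens (puzzles : List (List String × List Int)) (out : (List (Int × List (List String × List Int))) × (List (Int × Int))) : Prop := out = bucket_puzzles_by_greens_alt puzzles
instance (puzzles : List (List String × List Int)) (out : (List (Int × List (List String × List Int))) × (List (Int × Int))) : Decidable (Spec_bucket_puzzles_by_greens puzzles out) := by unfold Spec_bucket_puzzles_by_greens; infer_instance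

-- ===== CLAIM (what is proved, stated in full; the proofs are below) =====
def Claim_equal_bucket_puzzles_by_greens : Prop := ∀ (puzzles : List (List String × List Int)), Dom_bucket_puzzles_by_greens puzzles → Spec_bucket_puzzles_by_greens puzzles (bucket_puzzles_by_greens puzzles)

-- ===== LEMMAS AND PROOFS =====

-- A's per-number green count, as a function of the raw (unpadded, unreversed) digit list
def pvCntA (x : Int) : Int :=
  ((pvNumsLoop x).map (fun d => if d = 2 then (1 : Int) else 0)).sum

-- A's per-puzzle key s
def pvKeyA (p : List String × List Int) : Int :=
  (p.2.map (fun x =>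
    ((numtoternary x).map (fun d => if d = 2 then (1 : Int) else 0)).sum)).sum

-- the fuel x.toNat is sufficient for the digit loop: any larger fuel gives pvCntA
theorem pvNumsLoopF_sum (f : Nat) : ∀ (x : Int), x.toNat ≤ f →
    ((pvNumsLoopF f x).map (fun d => if d = 2 then (1 : Int) else 0)).sum = pvCntA x := by
  induction f using Nat.strong_induction_on with
  | _ f ih =>
    intro x hx
    match f with
    | 0 =>
      have h0 : x.toNat = 0 := by omega
      rw [pvCntA, pvNumsLoop, h0]
    | f+1 =>
      by_cases h : 0 < x
      · have hdiv : 0 ≤ x / 3 ∧ x / 3 < x := ⟨Int.ediv_nonneg (by omega) (by omega), by omega⟩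
        have hk : ∃ k, x.toNat = k + 1 := ⟨x.toNat - 1, by omega⟩
        obtain ⟨k, hk⟩ := hk
        rw [pvCntA, pvNumsLoop, hk]
        show ((pvNumsLoopF (f+1) x).map _).sum = ((pvNumsLoopF (k+1) x).map _).sum
        rw [pvNumsLoopF, pvNumsLoopF, if_pos h, if_pos h]
        simp only [List.map_cons, List.sum_cons,
          PySem.Int.floordiv_eq_ediv_of_pos (by omega : (0:Int) < 3)]
        have e1 := ih f (by omega) (x / 3) (by omega)
        have e2 := ih k (by omega) (x / 3) (by omega)
        rw [e1, e2]
      · have h0 : x.toNat = 0 := by omega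
        rw [pvCntA, pvNumsLoop, h0, pvNumsLoopF, pvNumsLoopF, if_neg h]

theorem pvCntA_pos (y : Int) (h : 0 < y) :
    pvCntA y = (if y % 3 = 2 then (1:Int) else 0) + pvCntA (y / 3) := by
  have hk : ∃ k, y.toNat = k + 1 := ⟨y.toNat - 1, by omega⟩
  obtain ⟨k, hk⟩ := hk
  rw [pvCntA, pvNumsLoop, hk, pvNumsLoopF, if_pos h]
  simp only [List.map_cons, List.sum_cons,
    PySem.Int.mod_eq_emod_of_pos (by omega : (0:Int) < 3),
    PySem.Int.floordiv_eq_ediv_of_pos (by omega : (0:Int) < 3)]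
  have hdiv : 0 ≤ y / 3 ∧ y / 3 < y := ⟨Int.ediv_nonneg (by omega) (by omega), by omega⟩
  rw [pvNumsLoopF_sum k (y / 3) (by omega)]

theorem pvCntA_nonpos (y : Int) (h : ¬ 0 < y) : pvCntA y = 0 := by
  have h0 : y.toNat = 0 := by omega
  rw [pvCntA, pvNumsLoop, h0, pvNumsLoopF]
  simp

-- the powers-of-3 scan computes the 2-digit count of x / 3^i (any sufficient fuel)
theorem pvPowLoopF_eq (f : Nat) : ∀ (x : Int) (i : Nat) (g : Int), (x + 1 - 3^i).toNat ≤ f →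
    pvPowLoopF f x i g = g + pvCntA (x / 3^i) := by
  induction f with
  | zero =>
    intro x i g hf
    have hp : (0:Int) < 3^i := pow_pos (by norm_num) i
    have hlt : x < 3^i := by omega
    have hy : ¬ 0 < x / 3^i := by
      have := (Int.ediv_lt_iff_lt_mul hp (a := x) (b := 1)).mpr (by omega)
      omega
    rw [pvPowLoopF, pvCntA_nonpos _ hy]
    ring
  | succ f ih =>
    intro x i g hf
    have hp : (0:Int) < 3^i := pow_pos (by norm_num) i
    by_cases h : (3:Int)^i ≤ x
    · have hsucc : (3:Int)^(i+1) = 3^i * 3 := pow_succ 3 i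
      have hy : 0 < x / 3^i := by
        have := (Int.le_ediv_iff_mul_le hp (a := 1) (b := x)).mpr (by omega)
        omega
      rw [pvPowLoopF, if_pos h, ih x (i+1) _ (by omega), pvCntA_pos _ hy,
        PySem.Int.mod_eq_emod_of_pos (by omega : (0:Int) < 3),
        PySem.Int.floordiv_eq_ediv_of_pos hp,
        Int.ediv_ediv_of_nonneg (le_of_lt hp), ← pow_succ]
      by_cases h2 : x / 3^i % 3 = 2 <;> simp [h2] <;> ring
    · have hy : ¬ 0 < x / 3^i := by
        have := (Int.ediv_lt_iff_lt_mul hp (a := x) (b := 1)).mpr (by omega)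
        omega
      rw [pvPowLoopF, if_neg h, pvCntA_nonpos _ hy]
      ring

-- padding with zeros does not change the 2-digit sum
theorem pvPadF_sum (f : Nat) : ∀ (l : List Int),
    ((pvPadF f l).map (fun d => if d = 2 then (1 : Int) else 0)).sum =
    (l.map (fun d => if d = 2 then (1 : Int) else 0)).sum := by
  induction f with
  | zero => intro l; rfl
  | succ f ih =>
    intro l
    rw [pvPadF]
    by_cases h : l.length < 5
    · rw [if_pos h, ih]; simp
    · rw [if_neg h]

-- B's green counter equals A's per-number 2-digit sum
theorem pvGreens_eq (x : Int) :
    pvGreens x = ((numtoternary x).map (fun d => if d = 2 then (1 : Int) else 0)).sum := by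
  rw [pvGreens, pvPowLoopF_eq x.toNat x 0 0 (by simp), numtoternary,
    List.map_reverse, List.sum_reverse, pvPad, pvPadF_sum]
  simp [pvCntA]

-- B's per-puzzle key equals A's s
theorem pvKeyB_eq (p : List String × List Int) :
    (p.2.map (fun x => pvGreens x)).sum = pvKeyA p := by
  unfold pvKeyA
  exact congrArg List.sum (List.map_congr_left (fun x _ => pvGreens_eq x))

-- number_counts as a function of number_puzzles: same keys, values replaced by lengths
def pvMapLen (d : PySem.Dict Int (List (List String × List Int))) : PySem.Dict Int Int :=
  PySem.Dict.mk (d.items.map (fun p => (p.1, (p.2.length : Int))))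

theorem pvMapLen_contains (d : PySem.Dict Int (List (List String × List Int))) (k : Int) :
    (pvMapLen d).contains k = d.contains k := by
  simp [pvMapLen, PySem.Dict.contains, List.any_map, Function.comp_def]

theorem pvMapLen_get? (d : PySem.Dict Int (List (List String × List Int))) (k : Int) :
    (pvMapLen d).get? k = (d.get? k).map (fun l => (l.length : Int)) := by
  simp [pvMapLen, PySem.Dict.get?, List.find?_map, Function.comp_def, Option.map_map]

theorem pvMapLen_getD (d : PySem.Dict Int (List (List String × List Int))) (k : Int) :
    (pvMapLen d).getD k 0 = ((d.getD k []).length : Int) := by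
  simp only [PySem.Dict.getD, pvMapLen_get?]
  cases d.get? k <;> simp

theorem pvMapLen_keys (d : PySem.Dict Int (List (List String × List Int))) :
    (pvMapLen d).keys = d.keys := by
  simp [pvMapLen, PySem.Dict.keys, List.map_map, Function.comp_def]

theorem pvMapLen_insert (d : PySem.Dict Int (List (List String × List Int))) (k : Int)
    (v : List (List String × List Int)) :
    pvMapLen (d.insert k v) = (pvMapLen d).insert k (v.length : Int) := by
  by_cases h : d.contains k = true
  · have h2 : (pvMapLen d).contains k = true := by rw [pvMapLen_contains]; exact h
    unfold PySem.Dict.insert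
    rw [if_pos h, if_pos h2]
    simp only [pvMapLen, List.map_map, PySem.Dict.mk.injEq]
    apply List.map_congr_left
    intro p _
    by_cases hp : p.1 = k <;> simp [hp, Function.comp_def]
  · have h2 : ¬ (pvMapLen d).contains k = true := by rw [pvMapLen_contains]; exact h
    unfold PySem.Dict.insert
    rw [if_neg h, if_neg h2]
    simp [pvMapLen]

theorem pvMapLen_empty : pvMapLen PySem.Dict.empty = PySem.Dict.empty := by
  simp [pvMapLen, PySem.Dict.empty]

theorem pvMapLen_modify (d : PySem.Dict Int (List (List String × List Int))) (k : Int)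
    (p : List String × List Int) :
    pvMapLen (d.modify k [] (fun l => l ++ [p])) = (pvMapLen d).modify k 0 (fun c => c + 1) := by
  simp only [PySem.Dict.modify, pvMapLen_insert, pvMapLen_getD]
  congr 1
  push_cast [List.length_append]
  simp

theorem pvModify_not_contains (d : PySem.Dict Int (List (List String × List Int))) (k : Int)
    (p : List String × List Int) (h : ¬ d.contains k = true) :
    d.modify k [] (fun l => l ++ [p]) = d.insert k [p] := by
  have hg : d.getD k [] = [] := by
    apply PySem.Dict.getD_of_not_contains
    simpa using h
  simp only [PySem.Dict.modify, hg, List.nil_append]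

-- proof-side reformulation of A's bucket update
def pvStepD (d : PySem.Dict Int (List (List String × List Int)))
    (p : List String × List Int) : PySem.Dict Int (List (List String × List Int)) :=
  d.modify (pvKeyA p) [] (fun l => l ++ [p])

-- A's paired fold runs in lock-step with the bucket-only fold plus its length image
theorem pvFold_eq (ps : List (List String × List Int)) :
    ∀ d, ps.foldl pvStepA (d, pvMapLen d) =
      (ps.foldl pvStepD d, pvMapLen (ps.foldl pvStepD d)) := by
  induction ps with
  | nil => intro d; rfl
  | cons p ps ih =>
    intro d
    have hstep : pvStepA (d, pvMapLen d) p = (pvStepD d p, pvMapLen (pvStepD d p)) := by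
      simp only [pvStepA, pvStepD, pvKeyA]
      by_cases h : d.contains (p.2.map (fun x =>
        ((numtoternary x).map (fun d => if d = 2 then (1 : Int) else 0)).sum)).sum = true
      · simp only [pvMapLen_contains, h, if_true, pvMapLen_modify]
      · simp only [pvMapLen_contains, h, Bool.false_eq_true, if_false,
          pvModify_not_contains _ _ _ h, pvMapLen_insert, List.length_cons,
          List.length_nil, Nat.zero_add, Nat.cast_one]
    simp only [List.foldl_cons, hstep, ih]

-- the bucket dict A builds
def pvDA (puzzles : List (List String × List Int)) : PySem.Dict Int (List (List String × List Int)) :=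
  puzzles.foldl pvStepD PySem.Dict.empty

theorem pvDA_keys (puzzles : List (List String × List Int)) :
    (pvDA puzzles).keys = PySem.Set.ofList (puzzles.map pvKeyA) := by
  unfold pvDA pvStepD
  rw [PySem.Dict.keys_foldl_modify_key]
  simp [PySem.Dict.keys_empty, PySem.Set.update_nil_left]

theorem pvDA_nodup (puzzles : List (List String × List Int)) : (pvDA puzzles).keys.Nodup := by
  unfold pvDA pvStepD
  exact PySem.Dict.nodup_keys_foldl_modify_key _ _ _ _ _ (by simp [PySem.Dict.keys_empty])

theorem pvDA_getD (puzzles : List (List String × List Int)) (k : Int) :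
    (pvDA puzzles).getD k [] = puzzles.filter (fun p => pvKeyA p == k) := by
  unfold pvDA pvStepD
  have h : puzzles.foldl (fun d p => d.modify (pvKeyA p) [] (fun l => l ++ [p])) PySem.Dict.empty
      = (puzzles.map (fun p => (pvKeyA p, p))).foldl
        (fun d q => d.modify q.1 [] (fun l => l ++ [q.2])) PySem.Dict.empty := by
    rw [List.foldl_map]
  rw [h, PySem.Dict.getD_foldl_modify_append, PySem.Dict.getD_empty, List.filter_map]
  simp [List.map_map, Function.comp_def]

-- zip of a list with its own map
theorem pvZip_map {α β : Type} (l : List α) (f : α → β) :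
    l.zip (l.map f) = l.map (fun x => (x, f x)) := by
  induction l with
  | nil => rfl
  | cons x xs ih => simp [ih]

-- B's per-key filtered bucket value equals A's bucket content
theorem pvVal_eq (puzzles : List (List String × List Int)) (k : Int) :
    (((puzzles.zip (puzzles.map (fun p => (p.2.map (fun x => pvGreens x)).sum))).filter
      (fun pk => pk.2 == k)).map (fun pk => pk.1)) = puzzles.filter (fun p => pvKeyA p == k) := by
  have hk : (puzzles.map (fun p => (p.2.map (fun x => pvGreens x)).sum)) = puzzles.map pvKeyA :=
    List.map_congr_left (fun p _ => pvKeyB_eq p)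
  rw [hk, pvZip_map, List.filter_map]
  simp [List.map_map, Function.comp_def]

-- B's key list, deduplicated, is A's key order
theorem pvOrder_eq (puzzles : List (List String × List Int)) :
    PySem.Set.ofList (puzzles.map (fun p => (p.2.map (fun x => pvGreens x)).sum))
      = (pvDA puzzles).keys := by
  rw [pvDA_keys]
  exact congrArg PySem.Set.ofList (List.map_congr_left (fun p _ => pvKeyB_eq p))

-- B's bucket dict equals A's
theorem pvBuckets_eq (puzzles : List (List String × List Int)) :
    ((pvDA puzzles).keys).foldl (fun d k =>
      d.insert k (((puzzles.zip (puzzles.map (fun p => (p.2.map (fun x => pvGreens x)).sum))).filter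
        (fun pk => pk.2 == k)).map (fun pk => pk.1))) PySem.Dict.empty = pvDA puzzles := by
  apply PySem.Dict.ext
  have hi := PySem.Dict.items_foldl_insert_fresh (l := (pvDA puzzles).keys) (k := fun k => k)
      (v := fun k => (((puzzles.zip (puzzles.map (fun p => (p.2.map (fun x => pvGreens x)).sum))).filter
        (fun pk => pk.2 == k)).map (fun pk => pk.1)))
      (d := PySem.Dict.empty)
      (by intro a _; simp [PySem.Dict.contains_empty])
      (by simpa using pvDA_nodup puzzles)
  beta_reduce at hi
  rw [hi, PySem.Dict.items_eq_map_keys (pvDA puzzles) (pvDA_nodup puzzles) []]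
  simp only [PySem.Dict.empty, List.nil_append]
  apply List.map_congr_left
  intro k _
  rw [pvVal_eq, pvDA_getD]

-- ===== VERDICT (by name: the statement is the Claim_ definition above) =====
theorem bucket_puzzles_by_greens_spec : Claim_equal_bucket_puzzles_by_greens := by
  intro puzzles _
  unfold Spec_bucket_puzzles_by_greens
  have hA : puzzles.foldl pvStepA (PySem.Dict.empty, PySem.Dict.empty)
      = (pvDA puzzles, pvMapLen (pvDA puzzles)) := by
    have h := pvFold_eq puzzles PySem.Dict.empty
    rw [pvMapLen_empty] at h
    exact h
  have hf : (fun (sd : PySem.Dict Int Int) k =>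
      sd.insert k ((pvMapLen (pvDA puzzles)).getD k 0)) =
      (fun (sd : PySem.Dict Int Int) k =>
      sd.insert k (((pvDA puzzles).getD k []).length : Int)) := by
    funext sd k
    rw [pvMapLen_getD]
  simp only [bucket_puzzles_by_greens, bucket_puzzles_by_greens_alt, sort_dict, hA,
    pvOrder_eq, pvBuckets_eq, pvMapLen_keys, hf]
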